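-- pv_equiv track=rewrite | github.com/jakubcimerman/advent-of-code | 2021/Day19/19.py | switch_axes
-- ===== SOURCE A (Python) =====
-- def switch_axes(scanner, ax1, ax2):
--     new_scanner = []
--     for i in scanner:
--         x = i[0]
--         y = i[1]
--         z = i[2]
--         if ax1 == "x" and ax2 == "y":
--             x = i[1]
--             y = i[0]
--         if ax1 == "x" and ax2 == "z":
--             x = i[2]
--             z = i[0]
--         if ax1 == "y" and ax2 == "z":
--             y = i[2]
--             z = i[1]
--         new_scanner.append([x, y, z])
--     return new_scanner
-- ===== SOURCE B (Python) =====
-- def switch_axes(scanner, ax1, ax2):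
--     # Column-wise: transpose into three coordinate columns, swap whole
--     # columns once, then zip the columns back into points.
--     cols = [[p[0] for p in scanner],
--             [p[1] for p in scanner],
--             [p[2] for p in scanner]]
--     if ax1 == "x" and ax2 == "y":
--         cols[0], cols[1] = cols[1], cols[0]
--     elif ax1 == "x" and ax2 == "z":
--         cols[0], cols[2] = cols[2], cols[0]
--     elif ax1 == "y" and ax2 == "z":
--         cols[1], cols[2] = cols[2], cols[1]
--     return [list(t) for t in zip(*cols)]
-- ===== Notes on version B (the rewrite author's own statement) =====
-- stated objective: alternative
-- what changed: B transposes the scanner into three coordinate columns, swaps two whole columns once, and zips the columns back into points, instead of A's per-point branch-and-swap single pass.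
import Mathlib
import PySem

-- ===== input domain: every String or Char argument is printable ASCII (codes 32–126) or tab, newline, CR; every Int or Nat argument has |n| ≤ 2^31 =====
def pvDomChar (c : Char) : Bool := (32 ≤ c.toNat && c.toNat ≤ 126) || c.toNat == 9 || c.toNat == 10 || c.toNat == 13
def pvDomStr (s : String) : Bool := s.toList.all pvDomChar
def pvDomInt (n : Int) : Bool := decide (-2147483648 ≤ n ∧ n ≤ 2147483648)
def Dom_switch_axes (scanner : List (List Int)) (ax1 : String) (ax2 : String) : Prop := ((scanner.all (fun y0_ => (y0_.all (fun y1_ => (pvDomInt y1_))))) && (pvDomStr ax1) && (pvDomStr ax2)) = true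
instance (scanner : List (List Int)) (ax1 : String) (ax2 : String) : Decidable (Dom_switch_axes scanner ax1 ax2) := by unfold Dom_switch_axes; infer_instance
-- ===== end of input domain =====

-- B transposes the scanner into three coordinate columns, swaps two whole columns once, and
-- zips the columns back into points, instead of A's per-point branch-and-swap pass (alternative).


-- ===== PORT A =====
-- i[k] with a default 0 outside Pre_ (Python raises IndexError there; Pre_ excludes it)
def pvIdxA (i : List Int) (k : Int) : Int := (PySem.List.pyGet? i k).getD 0

def switch_axes (scanner : List (List Int)) (ax1 : String) (ax2 : String) : List (List Int) :=
  scanner.foldl (fun new_scanner i =>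
    let x := pvIdxA i 0
    let y := pvIdxA i 1
    let z := pvIdxA i 2
    let xy := if ax1 = "x" ∧ ax2 = "y" then (pvIdxA i 1, pvIdxA i 0) else (x, y)
    let x := xy.1
    let y := xy.2
    let xz := if ax1 = "x" ∧ ax2 = "z" then (pvIdxA i 2, pvIdxA i 0) else (x, z)
    let x := xz.1
    let z := xz.2
    let yz := if ax1 = "y" ∧ ax2 = "z" then (pvIdxA i 2, pvIdxA i 1) else (y, z)
    let y := yz.1
    let z := yz.2
    new_scanner ++ [[x, y, z]]) []

-- ===== PORT B =====
-- one coordinate column: [p[k] for p in scanner] (default 0 outside Pre_, where Python raises)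
def pvColB (scanner : List (List Int)) (k : Int) : List Int :=
  scanner.map (fun p => (PySem.List.pyGet? p k).getD 0)

-- zip(*cols) for three columns, truncating at the shortest (Python's zip)
def pvZip3B : List Int → List Int → List Int → List (List Int)
  | a :: as_, b :: bs, c :: cs => [a, b, c] :: pvZip3B as_ bs cs
  | _, _, _ => []

def switch_axes_alt (scanner : List (List Int)) (ax1 : String) (ax2 : String) : List (List Int) :=
  let c0 := pvColB scanner 0
  let c1 := pvColB scanner 1
  let c2 := pvColB scanner 2
  let cols :=
    if ax1 = "x" ∧ ax2 = "y" then (c1, c0, c2)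
    else if ax1 = "x" ∧ ax2 = "z" then (c2, c1, c0)
    else if ax1 = "y" ∧ ax2 = "z" then (c0, c2, c1)
    else (c0, c1, c2)
  pvZip3B cols.1 cols.2.1 cols.2.2

-- ===== PRECONDITION & SPEC =====
-- Pre_: every point has at least 3 coordinates; on shorter points A (and B) raise IndexError.
def Pre_switch_axes (scanner : List (List Int)) (ax1 : String) (ax2 : String) : Prop :=
  ∀ p ∈ scanner, 3 ≤ p.length
instance (scanner : List (List Int)) (ax1 : String) (ax2 : String) : Decidable (Pre_switch_axes scanner ax1 ax2) := by unfold Pre_switch_axes; infer_instance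
def pvWitness_switch_axes : List (List Int) × String × String := ([[1, 2, 3], [4, 5, 6]], "x", "z")

def Spec_switch_axes (scanner : List (List Int)) (ax1 : String) (ax2 : String) (out : List (List Int)) : Prop := out = switch_axes_alt scanner ax1 ax2
instance (scanner : List (List Int)) (ax1 : String) (ax2 : String) (out : List (List Int)) : Decidable (Spec_switch_axes scanner ax1 ax2 out) := by unfold Spec_switch_axes; infer_instance

-- ===== CLAIM =====
def Claim_equal_switch_axes : Prop := ∀ (scanner : List (List Int)) (ax1 : String) (ax2 : String), Dom_switch_axes scanner ax1 ax2 → Pre_switch_axes scanner ax1 ax2 → Spec_switch_axes scanner ax1 ax2 (switch_axes scanner ax1 ax2)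

-- ===== LEMMAS AND PROOFS =====
-- zipping three maps over the same list is a single map of the triple
theorem pvZip3B_map (l : List (List Int)) (f g h : List Int → Int) :
    pvZip3B (l.map f) (l.map g) (l.map h) = l.map (fun p => [f p, g p, h p]) := by
  induction l with
  | nil => rfl
  | cons p t ih => simp [pvZip3B, ih]

-- ===== VERDICT =====
theorem switch_axes_spec : Claim_equal_switch_axes := by
  intro scanner ax1 ax2 _ _
  show _ = _
  unfold switch_axes switch_axes_alt pvColB
  rw [PySem.List.foldl_append_singleton_eq_map]
  by_cases h1 : ax1 = "x" ∧ ax2 = "y"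
  · obtain ⟨rfl, rfl⟩ := h1
    simp [pvIdxA, pvZip3B_map]
  · by_cases h2 : ax1 = "x" ∧ ax2 = "z"
    · obtain ⟨rfl, rfl⟩ := h2
      simp [pvIdxA, pvZip3B_map]
    · by_cases h3 : ax1 = "y" ∧ ax2 = "z"
      · obtain ⟨rfl, rfl⟩ := h3
        simp [pvIdxA, pvZip3B_map]
      · simp only [if_neg h1, if_neg h2, if_neg h3]
        rw [pvZip3B_map]
        simp [pvIdxA]
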